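-- pv_equiv track=rewrite | github.com/imaadinsane555-stack/QuMail | qumail_ai.py | detect_spam
-- ===== SOURCE A (Python) =====
-- _SPAM_KEYWORDS = [
--     "prize", "winner", "congratulations", "free", "click here",
--     "urgent", "act now", "limited time", "buy now", "credit card",
--     "lottery", "claim your", "deposit"
-- ]
--
-- def detect_spam(text: str) -> bool:
--     """Simple keyword-based spam detection."""
--     if not text:
--         return False
--     t = text.lower()
--     for kw in _SPAM_KEYWORDS:
--         if kw in t:
--             return True
--     if t.count("!") >= 3:
--         return True
--     return False
-- ===== SOURCE B (Python) =====
-- _SPAM_KEYWORDS = [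
--     "prize", "winner", "congratulations", "free", "click here",
--     "urgent", "act now", "limited time", "buy now", "credit card",
--     "lottery", "claim your", "deposit"
-- ]
--
-- def detect_spam(text: str) -> bool:
--     """Single left-to-right pass: at each position try every keyword as a prefix."""
--     if not text:
--         return False
--     t = text.lower()
--     for i in range(len(t)):
--         for kw in _SPAM_KEYWORDS:
--             if t.startswith(kw, i):
--                 return True
--     return t.count("!") >= 3
-- ===== Notes on version B (the rewrite author's own statement) =====
-- stated objective: alternative
-- what changed: Replaces the keyword-outer loop of independent substring scans with a single left-to-right position scan that tries every keyword as a prefix at each index, and folds the two True branches into one boolean return.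
import Mathlib
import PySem

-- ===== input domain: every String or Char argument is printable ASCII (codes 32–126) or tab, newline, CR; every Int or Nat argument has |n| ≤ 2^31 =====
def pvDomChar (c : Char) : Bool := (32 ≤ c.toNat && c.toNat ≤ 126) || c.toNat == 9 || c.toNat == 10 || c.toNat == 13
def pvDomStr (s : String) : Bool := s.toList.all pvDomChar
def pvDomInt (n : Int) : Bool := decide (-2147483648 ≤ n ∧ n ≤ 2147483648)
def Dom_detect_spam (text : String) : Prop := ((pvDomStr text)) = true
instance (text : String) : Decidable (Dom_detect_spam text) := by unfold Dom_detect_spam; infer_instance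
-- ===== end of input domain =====

-- B replaces A's keyword-outer loop of independent substring scans with one
-- left-to-right position scan trying every keyword as a prefix at each index
-- (objective: alternative; same result on all inputs).


-- ===== PORT A =====
def spamKeywordsA : List String :=
  ["prize", "winner", "congratulations", "free", "click here",
   "urgent", "act now", "limited time", "buy now", "credit card",
   "lottery", "claim your", "deposit"]

def detect_spam (text : String) : Bool :=
  if PySem.Str.len text == 0 then false
  else
    let t := PySem.Str.lower text
    if spamKeywordsA.any (fun kw => PySem.Str.isIn kw t) then true
    else if 3 ≤ PySem.Str.count t "!" then true
    else false

-- ===== PORT B =====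
def spamKeywordsB : List (List Char) :=
  ["prize".toList, "winner".toList, "congratulations".toList, "free".toList,
   "click here".toList, "urgent".toList, "act now".toList, "limited time".toList,
   "buy now".toList, "credit card".toList, "lottery".toList, "claim your".toList,
   "deposit".toList]

-- 'for i in range(len(t)): if any kw is a prefix of t at i: return True' — scan suffixes
def scanSpam : List Char → Bool
  | [] => false
  | c :: rest =>
      spamKeywordsB.any (fun kw => kw.isPrefixOf (c :: rest)) || scanSpam rest

def detect_spam_alt (text : String) : Bool :=
  if PySem.Str.len text == 0 then false
  else
    let t := PySem.Chars.lower text.toList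
    scanSpam t || decide (3 ≤ PySem.Chars.count t "!".toList)

-- ===== PRECONDITION & SPEC =====
def Spec_detect_spam (text : String) (out : Bool) : Prop := out = detect_spam_alt text
instance (text : String) (out : Bool) : Decidable (Spec_detect_spam text out) := by unfold Spec_detect_spam; infer_instance

-- ===== CLAIM (what is proved, stated in full; the proofs are below) =====
def Claim_equal_detect_spam : Prop := ∀ (text : String), Dom_detect_spam text → Spec_detect_spam text (detect_spam text)

-- ===== LEMMAS AND PROOFS =====

-- the position scan finds exactly the keywords occurring as an infix
theorem scanSpam_iff (s : List Char) :
    scanSpam s = true ↔ ∃ kw ∈ spamKeywordsB, kw <:+: s := by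
  induction s with
  | nil =>
      simp only [scanSpam, Bool.false_eq_true, false_iff]
      rintro ⟨kw, hkw, hinf⟩
      have : kw = [] := List.eq_nil_of_infix_nil hinf
      subst this
      revert hkw; decide
  | cons c rest ih =>
      simp only [scanSpam, Bool.or_eq_true, List.any_eq_true, ih]
      constructor
      · rintro (⟨kw, hkw, hp⟩ | ⟨kw, hkw, hinf⟩)
        · exact ⟨kw, hkw, ((List.isPrefixOf_iff_prefix).mp hp).isInfix⟩
        · exact ⟨kw, hkw, hinf.trans (List.suffix_cons c rest).isInfix⟩
      · rintro ⟨kw, hkw, hinf⟩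
        rcases List.infix_cons_iff.mp hinf with hp | hinf'
        · exact Or.inl ⟨kw, hkw, (List.isPrefixOf_iff_prefix).mpr hp⟩
        · exact Or.inr ⟨kw, hkw, hinf'⟩

theorem anyA_eq_scan (t : List Char) :
    spamKeywordsA.any (fun kw => PySem.Chars.isIn kw.toList t) = scanSpam t := by
  have hB : spamKeywordsB = spamKeywordsA.map String.toList := by rfl
  rw [Bool.eq_iff_iff, List.any_eq_true, scanSpam_iff, hB]
  simp only [PySem.Chars.isIn_iff_infix, List.mem_map]
  constructor
  · rintro ⟨kw, hkw, h⟩; exact ⟨kw.toList, ⟨kw, hkw, rfl⟩, h⟩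
  · rintro ⟨l, ⟨kw, hkw, rfl⟩, h⟩; exact ⟨kw, hkw, h⟩

-- ===== VERDICT (by name: the statement is the Claim_ definition above) =====
theorem detect_spam_spec : Claim_equal_detect_spam := by
  intro text _
  show detect_spam text = detect_spam_alt text
  unfold detect_spam detect_spam_alt
  rcases hlen : (PySem.Str.len text == 0) with _ | _
  · have hA : ∀ kw, PySem.Str.isIn kw (PySem.Str.lower text)
        = PySem.Chars.isIn kw.toList (PySem.Chars.lower text.toList) := by
      intro kw; simp [PySem.Str.isIn, PySem.Str.lower]
    simp only [hA]
    rw [anyA_eq_scan]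
    have hc : PySem.Str.count (PySem.Str.lower text) "!"
        = PySem.Chars.count (PySem.Chars.lower text.toList) "!".toList := by
      simp [PySem.Str.count, PySem.Str.lower]
    rw [hc]
    rcases scanSpam (PySem.Chars.lower text.toList) <;> simp
  · simp
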